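-- pv_equiv track=rewrite | github.com/andreasvc/adventofcode | 2023/adventofcode.py | day16
-- ===== SOURCE A (Python) =====
-- def day16(s):
-- 	def f(pos, dir):
-- 		seen = set()
-- 		beams = [(pos, dir)]
-- 		while beams:
-- 			(y, x), (dy, dx) = beams.pop()
-- 			y += dy
-- 			x += dx
-- 			pos, dir = (y, x), (dy, dx)
-- 			if (0 <= y < len(grid) and 0 <= x < len(grid[0])
-- 					and (pos, dir) not in seen):
-- 				seen.add((pos, dir))
-- 				if grid[y][x] == '.':
-- 					beams.append((pos, dir))
-- 				elif grid[y][x] == '/':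
-- 					beams.append((pos, refl1[dir]))
-- 				elif grid[y][x] == '\\':
-- 					beams.append((pos, refl2[dir]))
-- 				elif grid[y][x] == '|':
-- 					if dx == 0:
-- 						beams.append((pos, dir))
-- 					else:
-- 						beams.extend([(pos, up), (pos, down)])
-- 				elif grid[y][x] == '-':
-- 					if dy == 0:
-- 						beams.append((pos, dir))
-- 					else:
-- 						beams.extend([(pos, left), (pos, right)])
-- 		return len({pos for pos, _ in seen})
--
-- 	def sides():
-- 		for y, _ in enumerate(grid):
-- 			yield f((y, -1), right)
-- 			yield f((y, len(grid[0])), left)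
-- 		for x, _ in enumerate(grid[0]):
-- 			yield f((-1, x), down)
-- 			yield f((len(grid), x), up)
--
-- 	grid = s.splitlines()
-- 	down, right, up, left = [(1, 0), (0, 1), (-1, 0), (0, -1)]
-- 	refl1 = {right: up, up: right, left: down, down: left}  # /
-- 	refl2 = {right: down, down: right, left: up, up: left}  # \
-- 	return f((0, -1), (0, 1)), max(sides())
-- ===== SOURCE B (Python) =====
-- def day16(s):
-- 	grid = s.splitlines()
-- 	h = len(grid)
-- 	w = len(grid[0]) if grid else 0
--
-- 	def outgoing(c, dy, dx):
-- 		# directions leaving a cell of kind c entered with direction (dy, dx)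
-- 		if c == '.':
-- 			return [(dy, dx)]
-- 		if c == '/':
-- 			return [(-dx, -dy)]
-- 		if c == '\\':
-- 			return [(dx, dy)]
-- 		if c == '|':
-- 			return [(dy, dx)] if dx == 0 else [(-1, 0), (1, 0)]
-- 		if c == '-':
-- 			return [(dy, dx)] if dy == 0 else [(0, -1), (0, 1)]
-- 		return []
--
-- 	def step(y, x, dy, dx):
-- 		ny, nx = y + dy, x + dx
-- 		if 0 <= ny < h and 0 <= nx < w:
-- 			return ((ny, nx), (dy, dx))
-- 		return None
--
-- 	def f(pos, dir):
-- 		# breadth-first frontier expansion over (position, direction) states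
-- 		seen = set()
-- 		t0 = step(pos[0], pos[1], dir[0], dir[1])
-- 		frontier = set() if t0 is None else {t0}
-- 		while frontier:
-- 			seen |= frontier
-- 			frontier = {t for ((y, x), (dy, dx)) in frontier
-- 					for d2 in outgoing(grid[y][x], dy, dx)
-- 					for t in [step(y, x, d2[0], d2[1])]
-- 					if t is not None} - seen
-- 		return len({p for p, _ in seen})
--
-- 	vals = []
-- 	for y in range(h):
-- 		vals += [f((y, -1), (0, 1)), f((y, w), (0, -1))]
-- 	for x in range(w):
-- 		vals += [f((-1, x), (1, 0)), f((h, x), (-1, 0))]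
-- 	return f((0, -1), (0, 1)), max(vals)
-- ===== Notes on version B (the rewrite author's own statement) =====
-- stated objective: alternative
-- what changed: A simulates one beam at a time with an explicit LIFO stack of pending beams, reflection-lookup dicts and a seen-check at pop time; B computes the same energized set by set-at-a-time breadth-first frontier expansion to a fixpoint (seen |= frontier; frontier = successors(frontier) - seen), with reflections done by coordinate arithmetic ((dy,dx) -> (-dx,-dy) / (dx,dy)) instead of dict lookups.
import Mathlib
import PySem

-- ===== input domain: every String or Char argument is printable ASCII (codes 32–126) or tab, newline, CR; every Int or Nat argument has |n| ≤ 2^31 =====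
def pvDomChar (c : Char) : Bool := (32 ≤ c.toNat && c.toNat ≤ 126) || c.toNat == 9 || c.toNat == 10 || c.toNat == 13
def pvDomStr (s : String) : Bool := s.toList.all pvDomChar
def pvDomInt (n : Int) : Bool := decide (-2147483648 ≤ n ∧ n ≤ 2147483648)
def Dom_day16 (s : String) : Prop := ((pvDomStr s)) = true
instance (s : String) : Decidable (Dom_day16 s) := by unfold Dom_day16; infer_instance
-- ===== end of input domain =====

-- B replaces A's one-beam-at-a-time explicit stack simulation by a set-at-a-time frontier
-- (fixpoint) expansion with arithmetic reflections instead of lookup dicts (objective: alternative).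

-- A state of the simulation: ((y, x), (dy, dx)).
abbrev PvState := (Int × Int) × (Int × Int)

-- the four unit directions and the finite universe of in-bounds states; both loops' fuel is
-- derived from the universe's size, which bounds the number of iterations (each iteration
-- either marks an unseen state seen or discards one pending item)
def pvDirs : List (Int × Int) := [(1,0),(0,1),(-1,0),(0,-1)]

def pvAll (grid : List (List Char)) : List PvState :=
  (List.range grid.length).flatMap fun (y : Nat) =>
    (List.range (PySem.List.pyGetD grid 0 []).length).flatMap fun (x : Nat) =>
      pvDirs.map fun d => (((y : Int), (x : Int)), d)

-- ===== PORT A =====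
-- grid[y][x]; the default is only reached where Python A raises IndexError (outside Pre_)
def pvCellA (grid : List (List Char)) (y x : Int) : Char :=
  PySem.List.pyGetD (PySem.List.pyGetD grid y []) x ' '

-- refl1 = {right: up, up: right, left: down, down: left}  (the '/' mirror)
def pvRefl1 : PySem.Dict (Int × Int) (Int × Int) := PySem.Dict.ofList [((0,1),(-1,0)), ((-1,0),(0,1)), ((0,-1),(1,0)), ((1,0),(0,-1))]
-- refl2 = {right: down, down: right, left: up, up: left}  (the '\' mirror)
def pvRefl2 : PySem.Dict (Int × Int) (Int × Int) := PySem.Dict.ofList [((0,1),(1,0)), ((1,0),(0,1)), ((0,-1),(-1,0)), ((-1,0),(0,-1))]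

-- the beams pushed after marking state t seen (stack represented top-first, so Python's
-- beams.extend([a, b]) — popped b first — becomes [b, a] here); the Dict lookups' default is
-- unreachable: dirs stay in pvDirs, the dicts' key set
def pvPushA (grid : List (List Char)) (t : PvState) : List PvState :=
  let c := pvCellA grid t.1.1 t.1.2
  if c = '.' then [t]
  else if c = '/' then [(t.1, (pvRefl1.getD t.2 (0,0)))]
  else if c = '\\' then [(t.1, (pvRefl2.getD t.2 (0,0)))]
  else if c = '|' then (if t.2.2 = 0 then [t] else [(t.1,(1,0)), (t.1,(-1,0))])
  else if c = '-' then (if t.2.1 = 0 then [t] else [(t.1,(0,1)), (t.1,(0,-1))])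
  else []

-- the while-beams loop of A's f; fuel only guards termination and never runs out
-- (pvLoopA_mem below is proved for every sufficient fuel, and pvFA supplies one)
def pvLoopA (grid : List (List Char)) (fuel : Nat) (seen : PySem.Set PvState)
    (beams : List PvState) : PySem.Set PvState :=
  match fuel, beams with
  | 0, _ => seen
  | _ + 1, [] => seen
  | fuel + 1, b :: rest =>
    let y := b.1.1 + b.2.1
    let x := b.1.2 + b.2.2
    let t : PvState := ((y, x), b.2)
    if (0 ≤ y ∧ y < (grid.length : Int) ∧ 0 ≤ x ∧
        x < ((PySem.List.pyGetD grid 0 []).length : Int)) ∧ t ∉ seen then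
      pvLoopA grid fuel (PySem.Set.add seen t) (pvPushA grid t ++ rest)
    else
      pvLoopA grid fuel seen rest

-- A's inner function f
def pvFA (grid : List (List Char)) (pos dir : Int × Int) : Int :=
  ((PySem.Set.ofList ((pvLoopA grid (3 * (pvAll grid).length + 1) [] [(pos, dir)]).map
      Prod.fst)).length : Int)

def day16 (s : String) : Int × Int :=
  let grid := PySem.Chars.splitlines s.toList
  let sides : List Int :=
    ((List.range grid.length).flatMap fun yi =>
      [pvFA grid ((yi : Int), -1) (0, 1),
       pvFA grid ((yi : Int), ((PySem.List.pyGetD grid 0 []).length : Int)) (0, -1)]) ++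
    ((List.range (PySem.List.pyGetD grid 0 []).length).flatMap fun xi =>
      [pvFA grid (-1, (xi : Int)) (1, 0),
       pvFA grid ((grid.length : Int), (xi : Int)) (-1, 0)])
  (pvFA grid (0, -1) (0, 1),
   (PySem.List.max? sides (fun v => v)).getD 0)

-- ===== PORT B =====
-- w = len(grid[0]) if grid else 0
def pvW (grid : List (List Char)) : Int :=
  match grid with
  | [] => 0
  | g0 :: _ => (g0.length : Int)

-- outgoing(c, dy, dx): directions leaving a cell of kind c entered with direction (dy, dx)
def pvOutgoing (c : Char) (dy dx : Int) : List (Int × Int) :=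
  if c = '.' then [(dy, dx)]
  else if c = '/' then [(-dx, -dy)]
  else if c = '\\' then [(dx, dy)]
  else if c = '|' then (if dx = 0 then [(dy, dx)] else [(-1,0), (1,0)])
  else if c = '-' then (if dy = 0 then [(dy, dx)] else [(0,-1), (0,1)])
  else []

-- step(y, x, dy, dx)
def pvStep (grid : List (List Char)) (y x dy dx : Int) : Option PvState :=
  if 0 ≤ y + dy ∧ y + dy < (grid.length : Int) ∧ 0 ≤ x + dx ∧ x + dx < pvW grid then
    some ((y + dy, x + dx), (dy, dx))
  else none

-- grid[y][x] (in range wherever B's Python reads it inside Pre_)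
def pvCellB (grid : List (List Char)) (y x : Int) : Char :=
  PySem.List.pyGetD (PySem.List.pyGetD grid y []) x ' '

-- the successor states of one frontier state
def pvSuccs (grid : List (List Char)) (t : PvState) : List PvState :=
  (pvOutgoing (pvCellB grid t.1.1 t.1.2) t.2.1 t.2.2).filterMap fun d2 =>
    pvStep grid t.1.1 t.1.2 d2.1 d2.2

-- the while-frontier loop of B's f; fuel only guards termination and never runs out
def pvLoopB (grid : List (List Char)) (fuel : Nat) (seen frontier : PySem.Set PvState) :
    PySem.Set PvState :=
  match fuel with
  | 0 => seen
  | fuel + 1 =>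
    if frontier = [] then seen
    else
      pvLoopB grid fuel (PySem.Set.union seen frontier)
        (PySem.Set.diff (PySem.Set.ofList (frontier.flatMap (pvSuccs grid)))
          (PySem.Set.union seen frontier))

-- B's inner function f
def pvFB (grid : List (List Char)) (pos dir : Int × Int) : Int :=
  let frontier : PySem.Set PvState :=
    match pvStep grid pos.1 pos.2 dir.1 dir.2 with
    | none => []
    | some t0 => [t0]
  ((PySem.Set.ofList ((pvLoopB grid ((pvAll grid).length + 1) [] frontier).map
      Prod.fst)).length : Int)

def day16_alt (s : String) : Int × Int :=
  let grid := PySem.Chars.splitlines s.toList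
  let h := grid.length
  let w := pvW grid
  let vals : List Int :=
    ((List.range h).flatMap fun yi =>
      [pvFB grid ((yi : Int), -1) (0, 1), pvFB grid ((yi : Int), w) (0, -1)]) ++
    ((List.range w.toNat).flatMap fun xi =>
      [pvFB grid (-1, (xi : Int)) (1, 0), pvFB grid ((h : Int), (xi : Int)) (-1, 0)])
  (pvFB grid (0, -1) (0, 1), (PySem.List.max? vals (fun v => v)).getD 0)

-- ===== PRECONDITION & SPEC =====
-- Pre_ excludes exactly the inputs where Python A raises IndexError: the empty grid, and grids
-- whose later line is shorter than the first (a border beam then reads a missing cell).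
def Pre_day16 (s : String) : Prop :=
  PySem.Chars.splitlines s.toList ≠ [] ∧
  ∀ line ∈ PySem.Chars.splitlines s.toList,
    (PySem.List.pyGetD (PySem.Chars.splitlines s.toList) 0 []).length ≤ line.length
instance (s : String) : Decidable (Pre_day16 s) := by unfold Pre_day16; infer_instance
def pvWitness_day16 : String := ".\\\n||"

def Spec_day16 (s : String) (out : Int × Int) : Prop := out = day16_alt s
instance (s : String) (out : Int × Int) : Decidable (Spec_day16 s out) := by unfold Spec_day16; infer_instance

-- ===== CLAIM (what is proved, stated in full; the proofs are below) =====
def Claim_equal_day16 : Prop := ∀ (s : String), Dom_day16 s → Pre_day16 s → Spec_day16 s (day16 s)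

-- ===== LEMMAS AND PROOFS =====

theorem pv_mem_pvAll (grid : List (List Char)) (t : PvState) :
    t ∈ pvAll grid ↔ 0 ≤ t.1.1 ∧ t.1.1 < (grid.length : Int) ∧ 0 ≤ t.1.2 ∧
      t.1.2 < ((PySem.List.pyGetD grid 0 []).length : Int) ∧ t.2 ∈ pvDirs := by
  obtain ⟨⟨y, x⟩, d⟩ := t
  simp only [pvAll, List.mem_flatMap, List.mem_range, List.mem_map, Prod.mk.injEq]
  constructor
  · rintro ⟨a, ha, b, hb, c, hc, ⟨⟨hy, hx⟩, hd⟩⟩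
    subst hy; subst hx; subst hd
    refine ⟨by positivity, by exact_mod_cast ha, by positivity, by exact_mod_cast hb, hc⟩
  · rintro ⟨h1, h2, h3, h4, h5⟩
    refine ⟨y.toNat, by omega, x.toNat, by omega, d, h5, ⟨⟨by omega, by omega⟩, rfl⟩⟩

theorem pvPushA_dirs (grid : List (List Char)) (t : PvState) (hd : t.2 ∈ pvDirs) :
    ∀ p ∈ pvPushA grid t, p.2 ∈ pvDirs := by
  intro p hp
  obtain ⟨pos, d⟩ := t
  simp only [pvDirs, List.mem_cons, List.not_mem_nil, or_false] at hd
  simp only [pvPushA] at hp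
  rcases hd with h | h | h | h <;> subst h <;>
    split_ifs at hp <;>
    fin_cases hp <;> simp [pvDirs] <;> decide

theorem pvPushA_len (grid : List (List Char)) (t : PvState) :
    (pvPushA grid t).length ≤ 2 := by
  simp only [pvPushA]
  split_ifs <;> simp

theorem pvW_eq (grid : List (List Char)) :
    pvW grid = ((PySem.List.pyGetD grid 0 []).length : Int) := by
  cases grid <;> simp [pvW, PySem.List.pyGetD, PySem.List.pyGet?, PySem.List.pyIdx?]

theorem pvStep_mem (grid : List (List Char)) (y x dy dx : Int) (u : PvState)
    (h : pvStep grid y x dy dx = some u) (hd : (dy, dx) ∈ pvDirs) : u ∈ pvAll grid := by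
  unfold pvStep at h
  split_ifs at h with hc
  obtain ⟨h1, h2, h3, h4⟩ := hc
  rw [pvW_eq] at h4
  cases h
  exact (pv_mem_pvAll grid _).2 ⟨h1, h2, h3, h4, hd⟩

theorem pvOutgoing_dirs (c : Char) (dy dx : Int) (hd : (dy, dx) ∈ pvDirs) :
    ∀ e ∈ pvOutgoing c dy dx, e ∈ pvDirs := by
  intro e he
  simp only [pvDirs, List.mem_cons, List.not_mem_nil, or_false, Prod.mk.injEq] at hd
  unfold pvOutgoing at he
  rcases hd with ⟨h1, h2⟩ | ⟨h1, h2⟩ | ⟨h1, h2⟩ | ⟨h1, h2⟩ <;> subst h1 <;> subst h2 <;>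
    split_ifs at he <;> simp_all <;> rcases he with h | h <;> simp_all [pvDirs]

theorem pvSuccs_mem_all (grid : List (List Char)) (t : PvState) (hd : t.2 ∈ pvDirs) :
    ∀ u ∈ pvSuccs grid t, u ∈ pvAll grid := by
  intro u hu
  simp only [pvSuccs, List.mem_filterMap] at hu
  obtain ⟨d2, hd2, hstep⟩ := hu
  exact pvStep_mem grid _ _ _ _ u hstep (pvOutgoing_dirs _ _ _ hd d2 hd2)

theorem pvInit_mem (grid : List (List Char)) (y x dy dx : Int) (hd : (dy, dx) ∈ pvDirs) :
    ∀ u ∈ (match pvStep grid y x dy dx with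
           | none => ([] : PySem.Set PvState)
           | some t0 => [t0]), u ∈ pvAll grid := by
  intro u hu
  cases hstep : pvStep grid y x dy dx with
  | none => rw [hstep] at hu; cases hu
  | some t0 =>
    rw [hstep] at hu
    rw [List.mem_singleton] at hu
    subst hu
    exact pvStep_mem grid y x dy dx u hstep hd

-- one move of a beam, phrased through B's step/successor functions
def pvNext (grid : List (List Char)) (u v : PvState) : Prop := v ∈ pvSuccs grid u

def pvReach (grid : List (List Char)) : PvState → PvState → Prop :=
  Relation.ReflTransGen (pvNext grid)

-- "the beam b, once stepped, reaches t"
def pvReachB (grid : List (List Char)) (b t : PvState) : Prop :=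
  ∃ r, pvStep grid b.1.1 b.1.2 b.2.1 b.2.2 = some r ∧ pvReach grid r t

theorem pvStep_some_of (grid : List (List Char)) (y x dy dx : Int)
    (h : 0 ≤ y + dy ∧ y + dy < (grid.length : Int) ∧ 0 ≤ x + dx ∧
         x + dx < ((PySem.List.pyGetD grid 0 []).length : Int)) :
    pvStep grid y x dy dx = some ((y + dy, x + dx), (dy, dx)) := by
  unfold pvStep
  rw [pvW_eq, if_pos h]

theorem pvStep_none_of (grid : List (List Char)) (y x dy dx : Int)
    (h : ¬(0 ≤ y + dy ∧ y + dy < (grid.length : Int) ∧ 0 ≤ x + dx ∧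
           x + dx < ((PySem.List.pyGetD grid 0 []).length : Int))) :
    pvStep grid y x dy dx = none := by
  unfold pvStep
  rw [pvW_eq, if_neg h]

-- bridge: B's successor list has the same members as A's pushed beams after stepping
theorem pvSucc_iff_push (grid : List (List Char)) (t : PvState) (hd : t.2 ∈ pvDirs)
    (v : PvState) :
    v ∈ pvSuccs grid t ↔ ∃ p ∈ pvPushA grid t, pvStep grid p.1.1 p.1.2 p.2.1 p.2.2 = some v := by
  obtain ⟨⟨ty, tx⟩, d⟩ := t
  simp only [pvDirs, List.mem_cons, List.not_mem_nil, or_false] at hd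
  have hcell : pvCellB = pvCellA := rfl
  rcases hd with h | h | h | h <;> subst h <;>
    simp only [pvSuccs, pvOutgoing, pvPushA, hcell] <;>
    split_ifs <;>
    simp_all [List.mem_filterMap] <;>
    tauto

-- worklist invariant of A's loop: every successor of a seen state is either
-- already seen or still pending on the stack
def pvInvA (grid : List (List Char)) (seen beams : List PvState) : Prop :=
  ∀ u ∈ seen, ∀ p ∈ pvPushA grid u, ∀ v,
    pvStep grid p.1.1 p.1.2 p.2.1 p.2.2 = some v → v ∈ seen ∨ p ∈ beams

theorem pvEscapeA (grid : List (List Char)) (seen beams : List PvState)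
    (hsub : ∀ u ∈ seen, u ∈ pvAll grid) (hinv : pvInvA grid seen beams)
    {u t : PvState} (hu : u ∈ seen) (hr : pvReach grid u t) :
    t ∈ seen ∨ ∃ b ∈ beams, pvReachB grid b t := by
  revert hu
  induction hr using Relation.ReflTransGen.head_induction_on with
  | refl => exact fun hu => Or.inl hu
  | @head a c h' hrest ih =>
    intro ha
    obtain ⟨p, hp, hstep⟩ :=
      (pvSucc_iff_push grid a ((pv_mem_pvAll grid a).1 (hsub a ha)).2.2.2.2 c).1 h'
    rcases hinv a ha p hp c hstep with hc | hpb
    · exact ih hc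
    · exact Or.inr ⟨p, hpb, c, hstep, hrest⟩

theorem pvLoopA_mem (grid : List (List Char)) :
    ∀ (fuel : Nat) (seen : PySem.Set PvState) (beams : List PvState),
      seen.Nodup → (∀ u ∈ seen, u ∈ pvAll grid) → (∀ b ∈ beams, b.2 ∈ pvDirs) →
      pvInvA grid seen beams →
      3 * ((pvAll grid).length - seen.length) + beams.length ≤ fuel →
      ∀ t, t ∈ pvLoopA grid fuel seen beams ↔
        t ∈ seen ∨ ∃ b ∈ beams, pvReachB grid b t := by
  intro fuel
  induction fuel with
  | zero =>
    intro seen beams hn hsub hb hinv hm t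
    have hbeams : beams = [] := List.eq_nil_of_length_eq_zero (by omega)
    subst hbeams
    simp [pvLoopA]
  | succ fuel ih =>
    intro seen beams hn hsub hb hinv hm t
    match beams with
    | [] => simp [pvLoopA]
    | b :: rest =>
      by_cases hsp : (0 ≤ b.1.1 + b.2.1 ∧ b.1.1 + b.2.1 < (grid.length : Int) ∧
          0 ≤ b.1.2 + b.2.2 ∧
          b.1.2 + b.2.2 < ((PySem.List.pyGetD grid 0 []).length : Int)) ∧
          (((b.1.1 + b.2.1, b.1.2 + b.2.2), b.2) : PvState) ∉ seen
      · -- the popped beam steps to a new in-bounds state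
        have hstep : pvStep grid b.1.1 b.1.2 b.2.1 b.2.2 =
            some ((b.1.1 + b.2.1, b.1.2 + b.2.2), b.2) :=
          pvStep_some_of grid b.1.1 b.1.2 b.2.1 b.2.2 hsp.1
        have hd0 : ((((b.1.1 + b.2.1, b.1.2 + b.2.2), b.2) : PvState)).2 ∈ pvDirs :=
          hb b (List.mem_cons_self ..)
        have ht0 : (((b.1.1 + b.2.1, b.1.2 + b.2.2), b.2) : PvState) ∈ pvAll grid :=
          (pv_mem_pvAll grid _).2 ⟨hsp.1.1, hsp.1.2.1, hsp.1.2.2.1, hsp.1.2.2.2, hd0⟩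
        have hn' := PySem.Set.nodup_add seen (((b.1.1 + b.2.1, b.1.2 + b.2.2), b.2) : PvState) hn
        have hsub' : ∀ u ∈ PySem.Set.add seen ((b.1.1 + b.2.1, b.1.2 + b.2.2), b.2),
            u ∈ pvAll grid := by
          intro u hu
          rcases (PySem.Set.mem_add seen _ u).1 hu with h' | h'
          · exact hsub u h'
          · subst h'
            exact ht0
        have hb' : ∀ p ∈ pvPushA grid ((b.1.1 + b.2.1, b.1.2 + b.2.2), b.2) ++ rest,
            p.2 ∈ pvDirs := by
          intro p hp
          rcases List.mem_append.1 hp with h' | h'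
          · exact pvPushA_dirs grid _ hd0 p h'
          · exact hb p (List.mem_cons.2 (Or.inr h'))
        have hinv' : pvInvA grid (PySem.Set.add seen ((b.1.1 + b.2.1, b.1.2 + b.2.2), b.2))
            (pvPushA grid ((b.1.1 + b.2.1, b.1.2 + b.2.2), b.2) ++ rest) := by
          intro u hu p hp v hv
          rcases (PySem.Set.mem_add seen _ u).1 hu with hu' | hu'
          · rcases hinv u hu' p hp v hv with h1 | h1
            · exact Or.inl ((PySem.Set.mem_add seen _ v).2 (Or.inl h1))
            · rcases List.mem_cons.1 h1 with h2 | h2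
              · subst h2
                rw [hstep] at hv
                cases hv
                exact Or.inl ((PySem.Set.mem_add seen _ _).2 (Or.inr rfl))
              · exact Or.inr (List.mem_append.2 (Or.inr h2))
          · subst hu'
            exact Or.inr (List.mem_append.2 (Or.inl hp))
        have hlen : (PySem.Set.add seen ((b.1.1 + b.2.1, b.1.2 + b.2.2), b.2)).length =
            seen.length + 1 := by
          simp [PySem.Set.add, hsp.2]
        have hbound : (PySem.Set.add seen ((b.1.1 + b.2.1, b.1.2 + b.2.2), b.2)).length ≤
            (pvAll grid).length :=
          (List.subperm_of_subset hn' hsub').length_le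
        have hm' : 3 * ((pvAll grid).length -
            (PySem.Set.add seen ((b.1.1 + b.2.1, b.1.2 + b.2.2), b.2)).length) +
            (pvPushA grid ((b.1.1 + b.2.1, b.1.2 + b.2.2), b.2) ++ rest).length ≤ fuel := by
          have hp2 := pvPushA_len grid (((b.1.1 + b.2.1, b.1.2 + b.2.2), b.2) : PvState)
          rw [List.length_append]
          simp only [List.length_cons] at hm
          omega
        have hgoal : pvLoopA grid (fuel + 1) seen (b :: rest) =
            pvLoopA grid fuel (PySem.Set.add seen ((b.1.1 + b.2.1, b.1.2 + b.2.2), b.2))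
              (pvPushA grid ((b.1.1 + b.2.1, b.1.2 + b.2.2), b.2) ++ rest) := by
          simp only [pvLoopA]
          rw [if_pos hsp]
        rw [hgoal, ih _ _ hn' hsub' hb' hinv' hm' t]
        constructor
        · rintro (hs | ⟨p, hp, hreach⟩)
          · rcases (PySem.Set.mem_add seen _ t).1 hs with h1 | h1
            · exact Or.inl h1
            · subst h1
              exact Or.inr ⟨b, List.mem_cons_self .., _, hstep, Relation.ReflTransGen.refl⟩
          · rcases List.mem_append.1 hp with h1 | h1
            · obtain ⟨r, hstepr, hrr⟩ := hreach
              refine Or.inr ⟨b, List.mem_cons_self .., _, hstep,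
                Relation.ReflTransGen.head ?_ hrr⟩
              exact (pvSucc_iff_push grid _ hd0 r).2 ⟨p, h1, hstepr⟩
            · exact Or.inr ⟨p, List.mem_cons.2 (Or.inr h1), hreach⟩
        · rintro (hs | ⟨b', hb'', hreach⟩)
          · exact Or.inl ((PySem.Set.mem_add seen _ t).2 (Or.inl hs))
          · rcases List.mem_cons.1 hb'' with h1 | h1
            · subst h1
              obtain ⟨r, hstepr, hrr⟩ := hreach
              rw [hstep] at hstepr
              cases hstepr
              rcases (Relation.ReflTransGen.cases_head hrr) with h2 | ⟨c, hnext, hrc⟩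
              · exact Or.inl ((PySem.Set.mem_add seen _ t).2 (Or.inr h2.symm))
              · obtain ⟨p, hp, hstepc⟩ := (pvSucc_iff_push grid _ hd0 c).1 hnext
                exact Or.inr ⟨p, List.mem_append.2 (Or.inl hp), c, hstepc, hrc⟩
            · exact Or.inr ⟨b', List.mem_append.2 (Or.inr h1), hreach⟩
      · -- the popped beam leaves the grid or lands on an already-seen state
        have hinv' : pvInvA grid seen rest := by
          intro u hu p hp v hv
          rcases hinv u hu p hp v hv with h1 | h1
          · exact Or.inl h1
          · rcases List.mem_cons.1 h1 with h2 | h2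
            · subst h2
              by_cases hbnd : (0 ≤ p.1.1 + p.2.1 ∧ p.1.1 + p.2.1 < (grid.length : Int) ∧
                  0 ≤ p.1.2 + p.2.2 ∧
                  p.1.2 + p.2.2 < ((PySem.List.pyGetD grid 0 []).length : Int))
              · rw [pvStep_some_of grid p.1.1 p.1.2 p.2.1 p.2.2 hbnd] at hv
                cases hv
                have ht0 : (((p.1.1 + p.2.1, p.1.2 + p.2.2), p.2) : PvState) ∈ seen := by
                  by_contra hcon
                  exact hsp ⟨hbnd, hcon⟩
                exact Or.inl ht0
              · rw [pvStep_none_of grid p.1.1 p.1.2 p.2.1 p.2.2 hbnd] at hv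
                cases hv
            · exact Or.inr h2
        have hm' : 3 * ((pvAll grid).length - seen.length) + rest.length ≤ fuel := by
          simp only [List.length_cons] at hm
          omega
        have hgoal : pvLoopA grid (fuel + 1) seen (b :: rest) =
            pvLoopA grid fuel seen rest := by
          simp only [pvLoopA]
          rw [if_neg hsp]
        rw [hgoal, ih _ _ hn hsub (fun p hp => hb p (List.mem_cons.2 (Or.inr hp))) hinv' hm' t]
        constructor
        · rintro (hs | ⟨b', hb'', hreach⟩)
          · exact Or.inl hs
          · exact Or.inr ⟨b', List.mem_cons.2 (Or.inr hb''), hreach⟩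
        · rintro (hs | ⟨b', hb'', hreach⟩)
          · exact Or.inl hs
          · rcases List.mem_cons.1 hb'' with h1 | h1
            · subst h1
              obtain ⟨r, hstepr, hrr⟩ := hreach
              by_cases hbnd : (0 ≤ b'.1.1 + b'.2.1 ∧ b'.1.1 + b'.2.1 < (grid.length : Int) ∧
                  0 ≤ b'.1.2 + b'.2.2 ∧
                  b'.1.2 + b'.2.2 < ((PySem.List.pyGetD grid 0 []).length : Int))
              · rw [pvStep_some_of grid b'.1.1 b'.1.2 b'.2.1 b'.2.2 hbnd] at hstepr
                cases hstepr
                have ht0 : (((b'.1.1 + b'.2.1, b'.1.2 + b'.2.2), b'.2) : PvState) ∈ seen := by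
                  by_contra hcon
                  exact hsp ⟨hbnd, hcon⟩
                exact pvEscapeA grid seen rest hsub hinv' ht0 hrr
              · rw [pvStep_none_of grid b'.1.1 b'.1.2 b'.2.1 b'.2.2 hbnd] at hstepr
                cases hstepr
            · exact Or.inr ⟨b', h1, hreach⟩

-- frontier invariant of B's loop: seen's successors never escape seen ∪ frontier
def pvInvB (grid : List (List Char)) (seen frontier : List PvState) : Prop :=
  ∀ u ∈ seen, ∀ v ∈ pvSuccs grid u, v ∈ seen ∨ v ∈ frontier

theorem pvEscapeB (grid : List (List Char)) (seen frontier : List PvState)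
    (hinv : pvInvB grid seen frontier) {u t : PvState} (hu : u ∈ seen)
    (hr : pvReach grid u t) : t ∈ seen ∨ ∃ s ∈ frontier, pvReach grid s t := by
  revert hu
  induction hr using Relation.ReflTransGen.head_induction_on with
  | refl => exact fun hu => Or.inl hu
  | @head a c h' hrest ih =>
    intro ha
    rcases hinv a ha c h' with hc | hc
    · exact ih hc
    · exact Or.inr ⟨c, hc, hrest⟩

theorem pvLoopB_mem (grid : List (List Char)) :
    ∀ (fuel : Nat) (seen frontier : PySem.Set PvState),
      seen.Nodup → frontier.Nodup → (∀ u ∈ seen, u ∈ pvAll grid) →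
      (∀ u ∈ frontier, u ∈ pvAll grid) → (∀ u ∈ frontier, u ∉ seen) →
      pvInvB grid seen frontier →
      (pvAll grid).length + 1 - seen.length ≤ fuel →
      ∀ t, t ∈ pvLoopB grid fuel seen frontier ↔
        t ∈ seen ∨ ∃ u ∈ frontier, pvReach grid u t := by
  intro fuel
  induction fuel with
  | zero =>
    intro seen frontier hns hnf hsub hf hd hinv hm t
    have hle : seen.length ≤ (pvAll grid).length :=
      (List.subperm_of_subset hns hsub).length_le
    omega
  | succ fuel ih =>
    intro seen frontier hns hnf hsub hf hd hinv hm t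
    by_cases hfe : frontier = []
    · subst hfe
      simp [pvLoopB]
    · have hns' := PySem.Set.nodup_union seen frontier hns
      have hsub' : ∀ u ∈ PySem.Set.union seen frontier, u ∈ pvAll grid := by
        intro u hu
        rcases (PySem.Set.mem_union seen frontier u).1 hu with h | h
        · exact hsub u h
        · exact hf u h
      have hnf' : (PySem.Set.diff (PySem.Set.ofList (frontier.flatMap (pvSuccs grid)))
          (PySem.Set.union seen frontier)).Nodup :=
        PySem.Set.nodup_diff _ _ (PySem.Set.nodup_ofList _)
      have hf' : ∀ u ∈ PySem.Set.diff (PySem.Set.ofList (frontier.flatMap (pvSuccs grid)))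
          (PySem.Set.union seen frontier), u ∈ pvAll grid := by
        intro u hu
        have hu2 := ((PySem.Set.mem_diff _ _ u).1 hu).1
        rw [PySem.Set.mem_ofList] at hu2
        obtain ⟨tf, htf, hsucc⟩ := List.mem_flatMap.1 hu2
        exact pvSuccs_mem_all grid tf ((pv_mem_pvAll grid tf).1 (hf tf htf)).2.2.2.2 u hsucc
      have hd' : ∀ u ∈ PySem.Set.diff (PySem.Set.ofList (frontier.flatMap (pvSuccs grid)))
          (PySem.Set.union seen frontier), u ∉ PySem.Set.union seen frontier := by
        intro u hu
        exact ((PySem.Set.mem_diff _ _ u).1 hu).2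
      have hinv' : pvInvB grid (PySem.Set.union seen frontier)
          (PySem.Set.diff (PySem.Set.ofList (frontier.flatMap (pvSuccs grid)))
            (PySem.Set.union seen frontier)) := by
        intro u hu v hv
        rcases (PySem.Set.mem_union seen frontier u).1 hu with h1 | h1
        · rcases hinv u h1 v hv with h2 | h2
          · exact Or.inl ((PySem.Set.mem_union seen frontier v).2 (Or.inl h2))
          · exact Or.inl ((PySem.Set.mem_union seen frontier v).2 (Or.inr h2))
        · by_cases h2 : v ∈ PySem.Set.union seen frontier
          · exact Or.inl h2
          · refine Or.inr ((PySem.Set.mem_diff _ _ v).2 ⟨?_, h2⟩)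
            rw [PySem.Set.mem_ofList]
            exact List.mem_flatMap.2 ⟨u, h1, hv⟩
      have hlt : seen.length < (PySem.Set.union seen frontier).length := by
        obtain ⟨u0, hu0⟩ := List.exists_mem_of_ne_nil frontier hfe
        have h1 : (seen ++ [u0]).Nodup := by
          refine List.Nodup.append hns (List.nodup_singleton u0) ?_
          intro a ha hb
          rw [List.mem_singleton] at hb
          subst hb
          exact hd _ hu0 ha
        have h2 : (seen ++ [u0]) ⊆ PySem.Set.union seen frontier := by
          intro v hv
          rcases List.mem_append.1 hv with h | h
          · exact (PySem.Set.mem_union seen frontier v).2 (Or.inl h)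
          · simp at h
            subst h
            exact (PySem.Set.mem_union seen frontier v).2 (Or.inr hu0)
        have := (List.subperm_of_subset h1 h2).length_le
        simp at this
        omega
      have hm' : (pvAll grid).length + 1 - (PySem.Set.union seen frontier).length ≤ fuel := by
        omega
      have hgoal : pvLoopB grid (fuel + 1) seen frontier =
          pvLoopB grid fuel (PySem.Set.union seen frontier)
            (PySem.Set.diff (PySem.Set.ofList (frontier.flatMap (pvSuccs grid)))
              (PySem.Set.union seen frontier)) := by
        simp only [pvLoopB]
        rw [if_neg hfe]
      rw [hgoal, ih _ _ hns' hnf' hsub' hf' hd' hinv' hm' t]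
      constructor
      · rintro (hs | ⟨u', hu', hreach⟩)
        · rcases (PySem.Set.mem_union seen frontier t).1 hs with h1 | h1
          · exact Or.inl h1
          · exact Or.inr ⟨t, h1, Relation.ReflTransGen.refl⟩
        · have hu2 := ((PySem.Set.mem_diff _ _ u').1 hu').1
          rw [PySem.Set.mem_ofList] at hu2
          obtain ⟨u, hu, hsucc⟩ := List.mem_flatMap.1 hu2
          exact Or.inr ⟨u, hu, Relation.ReflTransGen.head hsucc hreach⟩
      · rintro (hs | ⟨u, hu, hreach⟩)
        · exact Or.inl ((PySem.Set.mem_union seen frontier t).2 (Or.inl hs))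
        · exact pvEscapeB grid (PySem.Set.union seen frontier) _ hinv'
            ((PySem.Set.mem_union seen frontier u).2 (Or.inr hu)) hreach

theorem pvCount_eq (l1 l2 : List PvState) (h : ∀ t, t ∈ l1 ↔ t ∈ l2) :
    (PySem.Set.ofList (l1.map Prod.fst)).length = (PySem.Set.ofList (l2.map Prod.fst)).length := by
  have hperm : List.Perm (PySem.Set.ofList (l1.map Prod.fst))
      (PySem.Set.ofList (l2.map Prod.fst)) := by
    rw [List.perm_ext_iff_of_nodup (PySem.Set.nodup_ofList _) (PySem.Set.nodup_ofList _)]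
    intro p
    simp only [PySem.Set.mem_ofList, List.mem_map]
    constructor
    · rintro ⟨t, ht, rfl⟩
      exact ⟨t, (h t).1 ht, rfl⟩
    · rintro ⟨t, ht, rfl⟩
      exact ⟨t, (h t).2 ht, rfl⟩
  exact hperm.length_eq

theorem pvF_eq (grid : List (List Char)) (pos dir : Int × Int) (hd : dir ∈ pvDirs) :
    pvFA grid pos dir = pvFB grid pos dir := by
  unfold pvFA pvFB
  congr 1
  apply pvCount_eq
  intro t
  have hA := pvLoopA_mem grid (3 * (pvAll grid).length + 1) [] [(pos, dir)] (by simp) (by simp)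
    (by intro b hb; simp at hb; subst hb; exact hd)
    (by intro u hu; cases hu) (by simp) t
  have hB := pvLoopB_mem grid ((pvAll grid).length + 1) []
    (match pvStep grid pos.1 pos.2 dir.1 dir.2 with
     | none => ([] : PySem.Set PvState)
     | some t0 => [t0])
    (by simp)
    (by cases hstep : pvStep grid pos.1 pos.2 dir.1 dir.2 <;> simp [hstep])
    (by simp)
    (fun u hu => pvInit_mem grid pos.1 pos.2 dir.1 dir.2 hd u hu)
    (by simp)
    (by intro u hu; cases hu)
    (by simp) t
  rw [hA, hB]
  simp only [List.not_mem_nil, false_or, List.mem_singleton, exists_eq_left]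
  cases hstep : pvStep grid pos.1 pos.2 dir.1 dir.2 with
  | none =>
    constructor
    · rintro ⟨r, hr, -⟩
      rw [hstep] at hr
      cases hr
    · rintro ⟨u, hu, -⟩
      simp at hu
  | some r =>
    constructor
    · rintro ⟨r', hr', hreach⟩
      rw [hstep] at hr'
      have h3 := Option.some.inj hr'
      exact ⟨r, by simp, h3 ▸ hreach⟩
    · rintro ⟨u, hu, hreach⟩
      simp at hu
      exact ⟨r, hstep, hu ▸ hreach⟩

theorem day16_agree (s : String) : day16 s = day16_alt s := by
  unfold day16 day16_alt
  simp only [pvF_eq _ _ (0, 1) (by decide), pvF_eq _ _ (0, -1) (by decide),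
    pvF_eq _ _ (1, 0) (by decide), pvF_eq _ _ (-1, 0) (by decide),
    pvW_eq, Int.toNat_natCast]

-- ===== VERDICT (by name: the statement is the Claim_ definition above) =====
theorem day16_spec : Claim_equal_day16 := by
  intro s _ _
  exact day16_agree s
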